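-- pv_equiv track=rewrite | github.com/axyorah/hn-post-clusterer | flaskr/utils/clusterpipe_utils.py | rebatch_generator
-- ===== SOURCE A (Python) =====
-- from typing import Any, Dict, List, Optional, Generator
--
-- def rebatch_generator(batches: Generator, min_batch_size: int):
--     """
--     resamples generator of batches so that
--     new batches have atleast `min_batch_size` elements
--     """
--     prev, curr = [], []
--     for batch in batches:
--         curr += batch
--         if len(curr) >= min_batch_size:
--             if prev:
--                 yield prev
--             prev = curr.copy()
--             curr = []
--
--     # last batch
--     yield prev + curr
-- ===== SOURCE B (Python) =====
-- def rebatch_generator(batches, min_batch_size):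
--     """
--     resamples generator of batches so that
--     new batches have atleast `min_batch_size` elements
--     """
--     # pass 1: flatten everything, recording cut positions into the flat stream
--     flat, cuts, prev = [], [], 0
--     for batch in batches:
--         flat += batch
--         if len(flat) - prev >= min_batch_size:
--             cuts.append(len(flat))
--             prev = len(flat)
--     # pass 2: emit slices of the flat stream between chunk start positions
--     if cuts:
--         bounds = [0] + cuts[:-1]
--         for lo, hi in zip(bounds, bounds[1:]):
--             yield flat[lo:hi]
--         yield flat[bounds[-1]:]
--     else:
--         yield flat
-- ===== Notes on version B (the rewrite author's own statement) =====
-- stated objective: alternative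
-- what changed: B replaces A's chunk-accumulator with prev-delayed yields by a two-pass flat-stream algorithm: pass one flattens all batches into one list while recording integer cut positions, pass two emits slices of the flat list between consecutive cut positions (merging the unfinished tail into the last slice).
-- outside the precondition, e.g. on rebatch_generator([[], [1]], 0): A returns [[1]], B returns [[], [1]]
import Mathlib
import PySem

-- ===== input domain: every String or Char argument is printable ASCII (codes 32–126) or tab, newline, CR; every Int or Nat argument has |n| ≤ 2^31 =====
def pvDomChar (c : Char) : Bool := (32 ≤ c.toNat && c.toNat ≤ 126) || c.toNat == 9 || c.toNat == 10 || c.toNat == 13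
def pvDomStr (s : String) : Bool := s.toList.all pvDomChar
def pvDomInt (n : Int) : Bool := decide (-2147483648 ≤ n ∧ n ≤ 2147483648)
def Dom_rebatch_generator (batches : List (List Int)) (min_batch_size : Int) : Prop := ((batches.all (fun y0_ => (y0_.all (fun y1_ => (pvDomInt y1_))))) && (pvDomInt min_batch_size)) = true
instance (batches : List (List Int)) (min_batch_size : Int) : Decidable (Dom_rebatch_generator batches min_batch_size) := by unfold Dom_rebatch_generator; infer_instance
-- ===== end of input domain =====

-- B replaces A's prev-delayed chunk yielding by a two-pass flat-stream algorithm (flatten + record cut positions, then emit slices); return-value equivalence on Pre_.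


-- ===== PORT A =====
-- loop body of A: curr += batch; on completion yield prev (if truthy), prev := curr, curr := []
def pvStepA (min_batch_size : Int) (st : List Int × List Int × List (List Int)) (batch : List Int) :
    List Int × List Int × List (List Int) :=
  let prev := st.1
  let curr := st.2.1 ++ batch
  let out := st.2.2
  if min_batch_size ≤ (curr.length : Int) then
    (curr, [], out ++ (if prev = [] then [] else [prev]))
  else
    (prev, curr, out)

def rebatch_generator (batches : List (List Int)) (min_batch_size : Int) : List (List Int) :=
  let s := batches.foldl (pvStepA min_batch_size) ([], [], [])
  s.2.2 ++ [s.1 ++ s.2.1]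

-- ===== PORT B =====
-- pass 1 of B: flat += batch; if len(flat) - prev >= min: record cut position len(flat), prev := len(flat)
def pvStepB (min_batch_size : Int) (st : List Int × List Int × Int) (batch : List Int) :
    List Int × List Int × Int :=
  let flat := st.1 ++ batch
  if min_batch_size ≤ (flat.length : Int) - st.2.2 then
    (flat, st.2.1 ++ [(flat.length : Int)], (flat.length : Int))
  else
    (flat, st.2.1, st.2.2)

-- pass 2 of B: slices of the flat stream between consecutive chunk start positions
def rebatch_generator_alt (batches : List (List Int)) (min_batch_size : Int) : List (List Int) :=
  let s := batches.foldl (pvStepB min_batch_size) ([], [], 0)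
  let flat := s.1
  let cuts := s.2.1
  if cuts = [] then [flat]
  else
    let bounds := 0 :: cuts.dropLast
    (bounds.zip bounds.tail).map (fun lh => PySem.List.slice flat (some lh.1) (some lh.2))
      ++ [PySem.List.slice flat (some (bounds.getLastD 0)) none]

-- ===== PRECONDITION & SPEC =====
-- Pre_ excludes nonpositive min_batch_size combined with empty input batches: there A can
-- complete an EMPTY chunk and its 'if prev' truthiness test silently drops it (an accident
-- of A's prev-delay implementation), which B's cut-position pass keeps as an empty slice.
def Pre_rebatch_generator (batches : List (List Int)) (min_batch_size : Int) : Prop :=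
  1 ≤ min_batch_size ∨ ∀ b ∈ batches, b ≠ []
instance (batches : List (List Int)) (min_batch_size : Int) : Decidable (Pre_rebatch_generator batches min_batch_size) := by unfold Pre_rebatch_generator; infer_instance

def pvWitness_rebatch_generator : List (List Int) × Int := ([[1], [2, 3], [4]], 2)

def Spec_rebatch_generator (batches : List (List Int)) (min_batch_size : Int) (out : List (List Int)) : Prop := out = rebatch_generator_alt batches min_batch_size
instance (batches : List (List Int)) (min_batch_size : Int) (out : List (List Int)) : Decidable (Spec_rebatch_generator batches min_batch_size out) := by unfold Spec_rebatch_generator; infer_instance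

-- ===== CLAIM (what is proved, stated in full; the proofs are below) =====
def Claim_equal_rebatch_generator : Prop := ∀ (batches : List (List Int)) (min_batch_size : Int), Dom_rebatch_generator batches min_batch_size → Pre_rebatch_generator batches min_batch_size → Spec_rebatch_generator batches min_batch_size (rebatch_generator batches min_batch_size)

-- ===== LEMMAS AND PROOFS =====

-- cumulative cut positions of a list of chunks, starting at offset s
def pvCum (s : Int) : List (List Int) → List Int
  | [] => []
  | c :: cs => (s + (c.length : Int)) :: pvCum (s + (c.length : Int)) cs

lemma pvCum_append (s : Int) (xs ys : List (List Int)) :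
    pvCum s (xs ++ ys) = pvCum s xs ++ pvCum (s + (xs.flatten.length : Int)) ys := by
  induction xs generalizing s with
  | nil => simp [pvCum]
  | cons c cs ih => simp [pvCum, ih, add_assoc]

lemma pvCum_ne_nil (s : Int) (c : List Int) (cs : List (List Int)) : pvCum s (c :: cs) ≠ [] := by
  simp [pvCum]

-- the emit pass on flat = pre ++ chunks.flatten ++ curr with cut positions pvCum |pre| chunks
-- reproduces chunks, with curr merged into the last one
lemma pv_emit (chunks : List (List Int)) (c pre curr : List Int) :
    ((((pre.length : Int) :: (pvCum (pre.length : Int) (c :: chunks)).dropLast).zip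
        ((pvCum (pre.length : Int) (c :: chunks)).dropLast)).map
        (fun lh => PySem.List.slice (pre ++ (c :: chunks).flatten ++ curr) (some lh.1) (some lh.2)))
      ++ [PySem.List.slice (pre ++ (c :: chunks).flatten ++ curr)
            (some (((pre.length : Int) :: (pvCum (pre.length : Int) (c :: chunks)).dropLast).getLastD 0)) none]
    = (c :: chunks).dropLast ++ [(c :: chunks).getLastD [] ++ curr] := by
  induction chunks generalizing c pre curr with
  | nil =>
    simp [pvCum, PySem.List.slice_from_natCast, List.append_assoc]
  | cons c2 cs ih =>
    have h2 := ih c2 (pre ++ c) curr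
    rcases hcu : pvCum (((pre ++ c).length : Int)) (c2 :: cs) with _ | ⟨u, us⟩
    · exact absurd hcu (pvCum_ne_nil _ _ _)
    have hlen : (((pre ++ c).length : Int)) = (pre.length : Int) + (c.length : Int) := by
      push_cast [List.length_append]; ring
    rw [hlen] at hcu
    have hfl : (pre ++ c) ++ (c2 :: cs).flatten ++ curr = pre ++ (c :: c2 :: cs).flatten ++ curr := by
      simp
    rw [hlen, hcu, hfl] at h2
    have hgoalcum : pvCum (pre.length : Int) (c :: c2 :: cs)
        = ((pre.length : Int) + (c.length : Int)) :: u :: us := by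
      rw [← hcu]; simp [pvCum]
    rw [hgoalcum]
    have hslice : PySem.List.slice (pre ++ (c :: c2 :: cs).flatten ++ curr)
        (some (pre.length : Int)) (some ((pre.length : Int) + (c.length : Int))) = c := by
      rw [PySem.List.slice_natCast_add]
      have : pre ++ (c :: c2 :: cs).flatten ++ curr = pre ++ (c ++ ((c2 :: cs).flatten ++ curr)) := by
        simp
      rw [this]
      simp
    rcases hdl : (u :: us).dropLast with _ | ⟨v, vs⟩ <;>
      simp_all

-- loop invariant tying A's fold state (prev, curr, out) to B's (flat, cuts, p)
def pvInv (stA : List Int × List Int × List (List Int)) (stB : List Int × List Int × Int) : Prop :=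
  stB.1 = stA.2.2.flatten ++ stA.1 ++ stA.2.1 ∧
  stB.2.2 = ((stA.2.2.flatten ++ stA.1).length : Int) ∧
  ((stB.2.1 = [] ∧ stA.2.2 = [] ∧ stA.1 = []) ∨
   (stB.2.1 = pvCum 0 (stA.2.2 ++ [stA.1]) ∧ stA.1 ≠ []))

lemma pv_loop (min_batch_size : Int) (batches : List (List Int))
    (hb : 1 ≤ min_batch_size ∨ ∀ b ∈ batches, b ≠ [])
    (stA : List Int × List Int × List (List Int)) (stB : List Int × List Int × Int)
    (hinv : pvInv stA stB) :
    pvInv (batches.foldl (pvStepA min_batch_size) stA) (batches.foldl (pvStepB min_batch_size) stB) := by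
  induction batches generalizing stA stB with
  | nil => simpa using hinv
  | cons batch rest ih =>
    have hbrest : 1 ≤ min_batch_size ∨ ∀ b ∈ rest, b ≠ [] := by
      rcases hb with h | h
      · exact Or.inl h
      · exact Or.inr fun b hbmem => h b (List.mem_cons_of_mem _ hbmem)
    simp only [List.foldl_cons]
    apply ih hbrest
    obtain ⟨prev, curr, out⟩ := stA
    obtain ⟨flat, cuts, p⟩ := stB
    obtain ⟨hf, hp, hrel⟩ := hinv
    simp only at hf hp hrel
    simp only [pvInv, pvStepA, pvStepB]
    have hflen : ((flat ++ batch).length : Int) - p = ((curr ++ batch).length : Int) := by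
      simp [hf, hp]
    by_cases hcut : min_batch_size ≤ ((curr ++ batch).length : Int)
    · rw [if_pos hcut, if_pos (by rw [hflen]; exact hcut)]
      have hne : curr ++ batch ≠ [] := by
        rcases hb with h | h
        · intro hnil; rw [hnil] at hcut; simp at hcut; omega
        · have : batch ≠ [] := h batch (List.mem_cons_self ..)
          simp [this]
      rcases hrel with ⟨hc, ho, hpr⟩ | ⟨hc, hpr⟩
      · subst hc; subst ho; subst hpr
        exact ⟨by simp [hf], by simp [hf], Or.inr ⟨by simp [pvCum, hf], hne⟩⟩
      · have hite : (if prev = [] then ([] : List (List Int)) else [prev]) = [prev] := by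
          simp [hpr]
        refine ⟨?_, ?_, Or.inr ⟨?_, hne⟩⟩
        · simp [hite, hf]
        · simp [hite, hf]
        · simp only [hite]
          rw [hc, pvCum_append 0 (out ++ [prev]) [curr ++ batch]]
          simp [pvCum, hf]
          ring
    · rw [if_neg hcut, if_neg (by rw [hflen]; exact hcut)]
      exact ⟨by simp [hf], by simpa using hp, hrel⟩

-- ===== VERDICT (by name: the statement is the Claim_ definition above) =====
theorem rebatch_generator_spec : Claim_equal_rebatch_generator := by
  intro batches min_batch_size _hdom hpre
  unfold Spec_rebatch_generator rebatch_generator rebatch_generator_alt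
  have h := pv_loop min_batch_size batches hpre ([], [], []) ([], [], 0)
    ⟨by simp, by simp, Or.inl ⟨rfl, rfl, rfl⟩⟩
  revert h
  generalize batches.foldl (pvStepA min_batch_size) ([], [], []) = sA
  generalize batches.foldl (pvStepB min_batch_size) ([], [], 0) = sB
  obtain ⟨prev, curr, out⟩ := sA
  obtain ⟨flat, cuts, p⟩ := sB
  rintro ⟨hf, hp, hrel⟩
  simp only at hf hp hrel ⊢
  rcases hrel with ⟨hc, ho, hpr⟩ | ⟨hc, hpr⟩
  · subst hc; subst ho; subst hpr
    simp [hf]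
  · rcases hout : out ++ [prev] with _ | ⟨c, chunks⟩
    · simp at hout
    · rw [hout] at hc
      rw [hc]
      rw [if_neg (pvCum_ne_nil _ _ _)]
      have hfl : flat = [] ++ (c :: chunks).flatten ++ curr := by
        rw [← hout]; simp [hf]
      have hcum0 : pvCum 0 (c :: chunks) = pvCum (((([] : List Int)).length : Int)) (c :: chunks) := by
        simp
      rw [hfl, hcum0]
      have := pv_emit chunks c [] curr
      have hres : (c :: chunks).dropLast ++ [(c :: chunks).getLastD [] ++ curr]
                = out ++ [prev ++ curr] := by
        rw [← hout]
        simp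
      rw [hres] at this
      rw [← this]
      rfl
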